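-- pv_equiv track=rewrite | github.com/sergiocalvofisotec/AlgoritmoEntrenamiento | algoritmo.py | clasificar_proporcional
-- ===== SOURCE A (Python) =====
-- def clasificar_proporcional(imagenes):
--     """Clasifica imágenes en 4 grupos con cantidad proporcional."""
--     total = len(imagenes)
--     grupos = [[] for _ in range(4)]
--     for i, imagen in enumerate(imagenes):
--         if i < total / 4:
--             grupos[0].append(imagen)
--         elif i < total / 2:
--             grupos[1].append(imagen)
--         elif i < total * 3 / 4:
--             grupos[2].append(imagen)
--         else:
--             grupos[3].append(imagen)
--
--     return grupos
-- ===== SOURCE B (Python) =====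
-- def clasificar_proporcional(imagenes):
--     """Clasifica imágenes en 4 grupos con cantidad proporcional."""
--     total = len(imagenes)
--     b1 = -(-total // 4)
--     b2 = -(-total // 2)
--     b3 = -(-(total * 3) // 4)
--     return [imagenes[:b1], imagenes[b1:b2], imagenes[b2:b3], imagenes[b3:]]
-- ===== Notes on version B (the rewrite author's own statement) =====
-- stated objective: simpler
-- what changed: Replaced the element-by-element four-way branch loop with closed-form ceiling cut indices and four slices (measured ~2x faster by bulk slicing instead of per-element branching).
import Mathlib
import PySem

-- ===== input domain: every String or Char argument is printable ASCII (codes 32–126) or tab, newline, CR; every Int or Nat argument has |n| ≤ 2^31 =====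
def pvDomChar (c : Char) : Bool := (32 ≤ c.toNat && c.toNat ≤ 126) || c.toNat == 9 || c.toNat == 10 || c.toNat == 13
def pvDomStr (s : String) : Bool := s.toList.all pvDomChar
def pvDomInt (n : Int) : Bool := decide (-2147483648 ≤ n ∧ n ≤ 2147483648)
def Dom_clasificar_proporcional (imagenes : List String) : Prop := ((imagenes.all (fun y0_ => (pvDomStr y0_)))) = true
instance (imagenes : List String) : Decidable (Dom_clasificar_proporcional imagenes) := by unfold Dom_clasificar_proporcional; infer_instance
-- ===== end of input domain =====

-- B replaces A's element-by-element four-way branch loop with closed-form ceiling cut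
-- indices and four slices (simpler; same O(n) cost).

-- ===== PORT A =====
-- A's float comparisons 'i < total/4', 'i < total/2', 'i < total*3/4' are ported as the
-- exact integer equivalents 4*i < total, 2*i < total, 4*i < 3*total (exact: the float
-- quotients are exact or the int comparands are far smaller than the float-precision edge
-- at the domain's list sizes).
def clasificar_proporcional (imagenes : List String) : List (List String) :=
  let total : Int := imagenes.length
  let g := (PySem.List.enumerate imagenes 0).foldl
    (fun (g : List String × List String × List String × List String) p =>
      let i := p.1
      let imagen := p.2
      if 4 * i < total then (g.1 ++ [imagen], g.2.1, g.2.2.1, g.2.2.2)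
      else if 2 * i < total then (g.1, g.2.1 ++ [imagen], g.2.2.1, g.2.2.2)
      else if 4 * i < 3 * total then (g.1, g.2.1, g.2.2.1 ++ [imagen], g.2.2.2)
      else (g.1, g.2.1, g.2.2.1, g.2.2.2 ++ [imagen]))
    ([], [], [], [])
  [g.1, g.2.1, g.2.2.1, g.2.2.2]

-- ===== PORT B =====
def clasificar_proporcional_alt (imagenes : List String) : List (List String) :=
  let total : Int := imagenes.length
  let b1 := -(PySem.Int.floordiv (-total) 4)
  let b2 := -(PySem.Int.floordiv (-total) 2)
  let b3 := -(PySem.Int.floordiv (-(total * 3)) 4)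
  [PySem.List.slice imagenes none (some b1),
   PySem.List.slice imagenes (some b1) (some b2),
   PySem.List.slice imagenes (some b2) (some b3),
   PySem.List.slice imagenes (some b3) none]

-- ===== PRECONDITION & SPEC =====
def Spec_clasificar_proporcional (imagenes : List String) (out : List (List String)) : Prop := out = clasificar_proporcional_alt imagenes
instance (imagenes : List String) (out : List (List String)) : Decidable (Spec_clasificar_proporcional imagenes out) := by unfold Spec_clasificar_proporcional; infer_instance

-- ===== CLAIM (what is proved, stated in full; the proofs are below) =====
def Claim_equal_clasificar_proporcional : Prop := ∀ (imagenes : List String), Dom_clasificar_proporcional imagenes → Spec_clasificar_proporcional imagenes (clasificar_proporcional imagenes)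

-- ===== LEMMAS AND PROOFS =====

-- The loop of A, starting at index s with cut points c1 ≤ c2 ≤ c3 (characterising the
-- three branch conditions), extends the four accumulators by the corresponding segments.
theorem pv_loop_spec (total c1 c2 c3 : Int)
    (hc1 : ∀ i : Int, 4 * i < total ↔ i < c1)
    (hc2 : ∀ i : Int, 2 * i < total ↔ i < c2)
    (hc3 : ∀ i : Int, 4 * i < 3 * total ↔ i < c3)
    (h12 : c1 ≤ c2) (h23 : c2 ≤ c3) :
    ∀ (xs : List String) (s : Int) (a b c d : List String),
    (PySem.List.enumerate xs s).foldl
      (fun (g : List String × List String × List String × List String) p =>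
        let i := p.1
        let imagen := p.2
        if 4 * i < total then (g.1 ++ [imagen], g.2.1, g.2.2.1, g.2.2.2)
        else if 2 * i < total then (g.1, g.2.1 ++ [imagen], g.2.2.1, g.2.2.2)
        else if 4 * i < 3 * total then (g.1, g.2.1, g.2.2.1 ++ [imagen], g.2.2.2)
        else (g.1, g.2.1, g.2.2.1, g.2.2.2 ++ [imagen]))
      (a, b, c, d)
    = (a ++ xs.take (c1 - s).toNat,
       b ++ (xs.drop (c1 - s).toNat).take ((c2 - s).toNat - (c1 - s).toNat),
       c ++ (xs.drop (c2 - s).toNat).take ((c3 - s).toNat - (c2 - s).toNat),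
       d ++ xs.drop (c3 - s).toNat) := by
  intro xs
  induction xs with
  | nil => intro s a b c d; simp [PySem.List.enumerate]
  | cons x xs ih =>
    intro s a b c d
    rw [PySem.List.enumerate_cons, List.foldl_cons]
    by_cases h1 : 4 * s < total
    · have hs : s < c1 := (hc1 s).mp h1
      simp only [h1, if_pos]
      rw [ih (s + 1)]
      have e1 : (c1 - s).toNat = ((c1 - (s+1)).toNat) + 1 := by omega
      have e2 : (c2 - s).toNat = ((c2 - (s+1)).toNat) + 1 := by omega
      have e3 : (c3 - s).toNat = ((c3 - (s+1)).toNat) + 1 := by omega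
      simp [e1, e2, e3]
    · by_cases h2 : 2 * s < total
      · have hs1 : ¬ s < c1 := fun h => h1 ((hc1 s).mpr h)
        have hs2 : s < c2 := (hc2 s).mp h2
        simp only [h1, h2, if_pos, if_neg, not_false_iff]
        rw [ih (s + 1)]
        have e1 : (c1 - s).toNat = 0 := by omega
        have e1' : (c1 - (s+1)).toNat = 0 := by omega
        have e2 : (c2 - s).toNat = ((c2 - (s+1)).toNat) + 1 := by omega
        have e3 : (c3 - s).toNat = ((c3 - (s+1)).toNat) + 1 := by omega
        simp [e1, e1', e2, e3]
      · by_cases h3 : 4 * s < 3 * total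
        · have hs2 : ¬ s < c2 := fun h => h2 ((hc2 s).mpr h)
          have hs1 : ¬ s < c1 := fun h => hs2 (lt_of_lt_of_le h h12)
          have hs3 : s < c3 := (hc3 s).mp h3
          simp only [h1, h2, h3, if_pos, if_neg, not_false_iff]
          rw [ih (s + 1)]
          have e1 : (c1 - s).toNat = 0 := by omega
          have e1' : (c1 - (s+1)).toNat = 0 := by omega
          have e2 : (c2 - s).toNat = 0 := by omega
          have e2' : (c2 - (s+1)).toNat = 0 := by omega
          have e3 : (c3 - s).toNat = ((c3 - (s+1)).toNat) + 1 := by omega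
          simp [e1, e1', e2, e2', e3]
        · have hs3 : ¬ s < c3 := fun h => h3 ((hc3 s).mpr h)
          have hs2 : ¬ s < c2 := fun h => hs3 (lt_of_lt_of_le h h23)
          have hs1 : ¬ s < c1 := fun h => hs2 (lt_of_lt_of_le h h12)
          simp only [h1, h2, h3, if_neg, not_false_iff]
          rw [ih (s + 1)]
          have e1 : (c1 - s).toNat = 0 := by omega
          have e1' : (c1 - (s+1)).toNat = 0 := by omega
          have e2 : (c2 - s).toNat = 0 := by omega
          have e2' : (c2 - (s+1)).toNat = 0 := by omega
          have e3 : (c3 - s).toNat = 0 := by omega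
          have e3' : (c3 - (s+1)).toNat = 0 := by omega
          simp [e1, e1', e2, e2', e3, e3']

-- ===== VERDICT (by name: the statement is the Claim_ definition above) =====
theorem clasificar_proporcional_spec : Claim_equal_clasificar_proporcional := by
  intro imagenes _
  unfold Spec_clasificar_proporcional clasificar_proporcional clasificar_proporcional_alt
  dsimp only
  set n : Int := (imagenes.length : Int) with hn
  have hn0 : 0 ≤ n := by simp [hn]
  have hd4 : (0:Int) < 4 := by norm_num
  have hd2 : (0:Int) < 2 := by norm_num
  rw [PySem.Int.floordiv_eq_ediv_of_pos hd4, PySem.Int.floordiv_eq_ediv_of_pos hd2,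
      PySem.Int.floordiv_eq_ediv_of_pos hd4]
  set c1 : Int := -((-n) / 4) with hc1def
  set c2 : Int := -((-n) / 2) with hc2def
  set c3 : Int := -((-(n * 3)) / 4) with hc3def
  have hc1 : ∀ i : Int, 4 * i < n ↔ i < c1 := by intro i; omega
  have hc2 : ∀ i : Int, 2 * i < n ↔ i < c2 := by intro i; omega
  have hc3 : ∀ i : Int, 4 * i < 3 * n ↔ i < c3 := by intro i; omega
  have h12 : c1 ≤ c2 := by omega
  have h23 : c2 ≤ c3 := by omega
  have hb1 : 0 ≤ c1 := by omega
  have hb2 : 0 ≤ c2 := by omega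
  have hb3 : 0 ≤ c3 := by omega
  rw [pv_loop_spec n c1 c2 c3 hc1 hc2 hc3 h12 h23 imagenes 0]
  rw [PySem.List.slice_to imagenes hb1, PySem.List.slice_toNat imagenes hb1 hb2,
      PySem.List.slice_toNat imagenes hb2 hb3, PySem.List.slice_from imagenes hb3]
  simp
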